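-- pv_equiv track=rewrite | github.com/jeongjeongguk/doc2md | doc2md.py | doctest2md
-- ===== SOURCE A (Python) =====
-- def doctest2md(lines):
--     """
--     Convert the given doctest to a syntax highlighted markdown segment.
--     """
--     is_only_code = True
--     for line in lines:
--         if not line.startswith('>>> ') and not line.startswith('... ') and line not in ['>>>', '...']:
--             is_only_code = False
--             break
--     if is_only_code:
--         orig = lines
--         lines = []
--         for line in orig:
--             lines.append(line[4:])
--     return lines
-- ===== SOURCE B (Python) =====
-- def doctest2md(lines):
--     result = []
--     for line in lines:
--         if not line.startswith('>>> ') and not line.startswith('... ') and line not in ['>>>', '...']: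
--             return lines
--         result.append(line[4:])
--     return result
-- ===== Notes on version B (the rewrite author's own statement) =====
-- stated objective: simpler
-- what changed: B fuses A's two passes (a check loop, then a rebuild loop) into one optimistic single pass that appends line[4:] as it goes and returns the original list unchanged the moment a non-doctest line is seen.
import Mathlib
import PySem

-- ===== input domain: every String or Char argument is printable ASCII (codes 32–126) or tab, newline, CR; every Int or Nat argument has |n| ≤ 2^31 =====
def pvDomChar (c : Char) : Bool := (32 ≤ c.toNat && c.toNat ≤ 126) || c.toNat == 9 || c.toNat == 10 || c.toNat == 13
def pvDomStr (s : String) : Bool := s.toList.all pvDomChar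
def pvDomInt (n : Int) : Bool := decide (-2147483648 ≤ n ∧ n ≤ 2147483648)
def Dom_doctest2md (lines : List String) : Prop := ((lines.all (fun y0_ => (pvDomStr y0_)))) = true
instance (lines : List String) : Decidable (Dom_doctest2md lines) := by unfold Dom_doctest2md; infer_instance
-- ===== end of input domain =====

-- B fuses A's two passes (check loop then rebuild loop) into one single pass with early return of the original list; objective: simpler.


-- ===== PORT A =====
-- whether a line fails the doctest pattern (A's break condition / B's early-return condition)
def doctest2mdBad (line : String) : Bool :=
  !PySem.Str.startswith line ">>> " && !PySem.Str.startswith line "... " &&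
    !(line == ">>>" || line == "...")

-- A's first loop: is_only_code with break
def doctest2mdCheck : List String → Bool
  | [] => true
  | line :: rest => if doctest2mdBad line then false else doctest2mdCheck rest

def doctest2md (lines : List String) : List String :=
  if doctest2mdCheck lines then
    lines.foldl (fun acc line => acc ++ [PySem.Str.slice line (some 4) none]) []
  else lines

-- ===== PORT B =====
-- B's single pass with early return of the original list
def doctest2mdAltGo (orig : List String) : List String → List String → List String
  | acc, [] => acc
  | acc, line :: rest =>
    if doctest2mdBad line then orig
    else doctest2mdAltGo orig (acc ++ [PySem.Str.slice line (some 4) none]) rest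

def doctest2md_alt (lines : List String) : List String :=
  doctest2mdAltGo lines [] lines

-- ===== PRECONDITION & SPEC =====
def Spec_doctest2md (lines : List String) (out : List String) : Prop := out = doctest2md_alt lines
instance (lines : List String) (out : List String) : Decidable (Spec_doctest2md lines out) := by unfold Spec_doctest2md; infer_instance

-- ===== CLAIM (what is proved, stated in full; the proofs are below) =====
def Claim_equal_doctest2md : Prop := ∀ (lines : List String), Dom_doctest2md lines → Spec_doctest2md lines (doctest2md lines)

-- ===== LEMMAS AND PROOFS =====

-- ===== VERDICT (by name: the statement is the Claim_ definition above) =====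
theorem doctest2mdAltGo_eq (orig : List String) (rest : List String) : ∀ acc,
    doctest2mdAltGo orig acc rest =
      if doctest2mdCheck rest then
        acc ++ rest.map (fun line => PySem.Str.slice line (some 4) none)
      else orig := by
  induction rest with
  | nil => intro acc; simp [doctest2mdAltGo, doctest2mdCheck]
  | cons line rest ih =>
    intro acc
    simp only [doctest2mdAltGo, doctest2mdCheck]
    by_cases h : doctest2mdBad line = true
    · simp [h]
    · simp only [h, if_false, Bool.false_eq_true, ih]
      split <;> simp_all

theorem doctest2mdFoldl_eq (lines : List String) : ∀ acc,
    lines.foldl (fun acc line => acc ++ [PySem.Str.slice line (some 4) none]) acc =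
      acc ++ lines.map (fun line => PySem.Str.slice line (some 4) none) := by
  induction lines with
  | nil => simp
  | cons line rest ih => intro acc; simp [List.foldl, ih]

theorem doctest2md_spec : Claim_equal_doctest2md := by
  intro lines _
  unfold Spec_doctest2md doctest2md doctest2md_alt
  rw [doctest2mdAltGo_eq, doctest2mdFoldl_eq]
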